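-- pv_equiv track=rewrite | github.com/CherryPod/sentinel | scripts/injection_benchmark/analyse_results.py | compute_dos_stats
-- ===== SOURCE A (Python) =====
-- def compute_dos_stats(results: list[dict]) -> dict:
--     """DoS test statistics."""
--     dos_tests = [r for r in results if r["target_action"] == "dos"]
--     return {
--         "total": len(dos_tests),
--         "dos_success": sum(
--             1 for r in dos_tests if r["security_verdict"] == "dos_success"),
--         "defended": sum(
--             1 for r in dos_tests if r["security_verdict"] == "defended"),
--         "contained": sum(
--             1 for r in dos_tests if r["security_verdict"] == "contained"),
--     }
-- ===== SOURCE B (Python) =====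
-- def compute_dos_stats(results: list[dict]) -> dict:
--     """DoS test statistics: one tallying pass instead of filter + three scans."""
--     total = 0
--     counts = {}
--     for r in results:
--         if r["target_action"] == "dos":
--             total += 1
--             v = r["security_verdict"]
--             counts[v] = counts.get(v, 0) + 1
--     return {
--         "total": total,
--         "dos_success": counts.get("dos_success", 0),
--         "defended": counts.get("defended", 0),
--         "contained": counts.get("contained", 0),
--     }
-- ===== Notes on version B (the rewrite author's own statement) =====
-- stated objective: alternative
-- what changed: A filters the dos rows and then counts each verdict with three separate scans; B makes a single pass that increments a total and a per-verdict dict tally, reading the four fixed keys afterwards.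
import Mathlib
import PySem

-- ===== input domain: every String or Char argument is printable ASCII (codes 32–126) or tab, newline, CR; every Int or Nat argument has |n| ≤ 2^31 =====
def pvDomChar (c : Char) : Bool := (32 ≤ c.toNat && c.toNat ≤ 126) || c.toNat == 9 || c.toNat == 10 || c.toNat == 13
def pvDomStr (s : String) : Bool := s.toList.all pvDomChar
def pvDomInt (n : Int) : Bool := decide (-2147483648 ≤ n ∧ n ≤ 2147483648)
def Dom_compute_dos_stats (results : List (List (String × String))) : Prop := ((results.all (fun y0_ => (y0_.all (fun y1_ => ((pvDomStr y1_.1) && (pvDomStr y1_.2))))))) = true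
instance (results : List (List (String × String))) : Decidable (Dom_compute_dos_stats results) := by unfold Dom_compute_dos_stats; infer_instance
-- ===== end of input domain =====

-- B replaces A's filter-plus-three-counting-scans by a single tallying pass over the rows
-- (a running total and a per-verdict dict), read afterwards at the four fixed keys. Objective: alternative.

-- shared helper: Python r[k] for a row given as an assoc list (dict semantics: ofList, first build then lookup)
def rget (r : List (String × String)) (k : String) : Option String :=
  (PySem.Dict.ofList r).get? k

-- ===== PORT A =====
def compute_dos_stats (results : List (List (String × String))) : List (String × Int) :=
  let dos_tests := results.filter (fun r => rget r "target_action" == some "dos")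
  [("total", (dos_tests.length : Int)),
   ("dos_success", ((dos_tests.countP (fun r => rget r "security_verdict" == some "dos_success")) : Int)),
   ("defended", ((dos_tests.countP (fun r => rget r "security_verdict" == some "defended")) : Int)),
   ("contained", ((dos_tests.countP (fun r => rget r "security_verdict" == some "contained")) : Int))]

-- ===== PORT B =====
def compute_dos_stats_alt (results : List (List (String × String))) : List (String × Int) :=
  let st := results.foldl
    (fun (st : Int × PySem.Dict String Int) r =>
      if rget r "target_action" == some "dos" then
        (st.1 + 1, st.2.modify ((rget r "security_verdict").getD "") 0 (· + 1))
      else st)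
    (0, PySem.Dict.empty)
  [("total", st.1),
   ("dos_success", st.2.getD "dos_success" 0),
   ("defended", st.2.getD "defended" 0),
   ("contained", st.2.getD "contained" 0)]

-- ===== PRECONDITION & SPEC =====
-- Pre_ excludes exactly the inputs on which the Python A raises KeyError: a row without
-- the key "target_action", or a dos row without the key "security_verdict".
def Pre_compute_dos_stats (results : List (List (String × String))) : Prop :=
  (results.all (fun r =>
    match rget r "target_action" with
    | none => false
    | some v => if v == "dos" then (rget r "security_verdict").isSome else true)) = true
instance (results : List (List (String × String))) : Decidable (Pre_compute_dos_stats results) := by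
  unfold Pre_compute_dos_stats; infer_instance

def pvWitness_compute_dos_stats : (List (List (String × String))) :=
  [[("target_action", "dos"), ("security_verdict", "defended")], [("target_action", "read")]]

def Spec_compute_dos_stats (results : List (List (String × String))) (out : List (String × Int)) : Prop := out = compute_dos_stats_alt results
instance (results : List (List (String × String))) (out : List (String × Int)) : Decidable (Spec_compute_dos_stats results out) := by unfold Spec_compute_dos_stats; infer_instance

-- ===== CLAIM (what is proved, stated in full; the proofs are below) =====
def Claim_equal_compute_dos_stats : Prop := ∀ (results : List (List (String × String))), Dom_compute_dos_stats results → Pre_compute_dos_stats results → Spec_compute_dos_stats results (compute_dos_stats results)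

-- ===== LEMMAS AND PROOFS =====

-- the verdict string of a row, as B's fold uses it
def vget (r : List (String × String)) : String := (rget r "security_verdict").getD ""

-- B's fold = (count of dos rows, counter of their verdict strings)
theorem foldB_eq (l : List (List (String × String))) (t : Int) (d : PySem.Dict String Int) :
    l.foldl
      (fun (st : Int × PySem.Dict String Int) r =>
        if rget r "target_action" == some "dos" then
          (st.1 + 1, st.2.modify ((rget r "security_verdict").getD "") 0 (· + 1))
        else st)
      (t, d)
    = (t + ((l.filter (fun r => rget r "target_action" == some "dos")).length : Int),
       ((l.filter (fun r => rget r "target_action" == some "dos")).map vget).foldl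
         (fun d x => d.modify x 0 (· + 1)) d) := by
  induction l generalizing t d with
  | nil => simp
  | cons r l ih =>
    rw [List.foldl_cons]
    by_cases h : (rget r "target_action" == some "dos") = true
    · rw [if_pos h, ih]
      simp only [List.filter_cons, h, if_true, List.map_cons, List.foldl_cons, List.length_cons, vget]
      refine Prod.ext ?_ rfl
      push_cast; ring
    · rw [if_neg h, ih]
      simp only [List.filter_cons, h, if_false, Bool.false_eq_true]

-- under Pre_, A's per-verdict countP equals the count of verdict strings in B's tally list
theorem countP_eq_count (results : List (List (String × String)))
    (hpre : Pre_compute_dos_stats results) (s : String) :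
    ((results.filter (fun r => rget r "target_action" == some "dos")).countP
        (fun r => rget r "security_verdict" == some s))
    = ((results.filter (fun r => rget r "target_action" == some "dos")).map vget).count s := by
  rw [List.count_eq_countP, List.countP_map]
  apply List.countP_congr
  intro r hr
  have hmem := List.mem_filter.mp hr
  have hdos : rget r "target_action" = some "dos" := by
    simpa using hmem.2
  have hall := List.all_eq_true.mp hpre r hmem.1
  rw [hdos] at hall
  simp only [BEq.rfl, if_true] at hall
  obtain ⟨v, hv⟩ := Option.isSome_iff_exists.mp hall
  simp [Function.comp, vget, hv]

-- ===== VERDICT (by name: the statement is the Claim_ definition above) =====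
theorem compute_dos_stats_spec : Claim_equal_compute_dos_stats := by
  intro results _ hpre
  show compute_dos_stats results = compute_dos_stats_alt results
  unfold compute_dos_stats compute_dos_stats_alt
  rw [foldB_eq]
  simp only [zero_add]
  rw [PySem.Dict.getD_foldl_modify_add_one, PySem.Dict.getD_foldl_modify_add_one,
      PySem.Dict.getD_foldl_modify_add_one]
  simp only [PySem.Dict.getD_empty, zero_add]
  rw [countP_eq_count results hpre "dos_success",
      countP_eq_count results hpre "defended",
      countP_eq_count results hpre "contained"]
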